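-- pv_equiv track=rewrite | github.com/Julesc013/dominium | tools/chem/tool_run_chem_stress.py | _summarize_residuals
-- ===== SOURCE A (Python) =====
-- from typing import Dict, List, Mapping, Sequence
--
-- def _summarize_residuals(values: Sequence[int]) -> dict:
--     rows = [int(v) for v in values]
--     if not rows:
--         return {"count": 0, "max_abs": 0, "sum_abs": 0}
--     return {
--         "count": int(len(rows)),
--         "max_abs": int(max(abs(v) for v in rows)),
--         "sum_abs": int(sum(abs(v) for v in rows)),
--     }
-- ===== SOURCE B (Python) =====
-- def _summarize_residuals(values):
--     count = 0
--     max_abs = 0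
--     sum_abs = 0
--     for v in values:
--         a = abs(int(v))
--         count += 1
--         sum_abs += a
--         if a > max_abs:
--             max_abs = a
--     return {"count": count, "max_abs": max_abs, "sum_abs": sum_abs}
-- ===== Notes on version B (the rewrite author's own statement) =====
-- stated objective: alternative
-- what changed: Replaces the materialized intermediate list plus three separate reductions (len, max-generator, sum-generator) and the empty-list special case with one accumulator loop maintaining count/max_abs/sum_abs, which yields all zeros on empty input without a branch.
import Mathlib
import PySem

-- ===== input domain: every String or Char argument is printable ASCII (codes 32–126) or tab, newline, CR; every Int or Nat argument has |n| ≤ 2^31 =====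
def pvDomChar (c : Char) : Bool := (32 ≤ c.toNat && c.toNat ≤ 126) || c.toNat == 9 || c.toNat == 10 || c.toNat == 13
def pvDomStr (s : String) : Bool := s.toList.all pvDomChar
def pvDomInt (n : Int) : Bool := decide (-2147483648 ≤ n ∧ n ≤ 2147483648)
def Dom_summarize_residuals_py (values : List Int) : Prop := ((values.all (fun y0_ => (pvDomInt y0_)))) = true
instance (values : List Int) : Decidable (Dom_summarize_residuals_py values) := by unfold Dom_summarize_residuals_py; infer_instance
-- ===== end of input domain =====

-- B fuses A's materialized list and three separate reductions (len / max / sum, plus an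
-- empty-list branch) into one accumulator loop; alternative decomposition, same cost.


-- ===== PORT A =====
-- rows = [int(v) for v in values]  (int(v) is the identity on Int)
-- max(abs(v) for v in rows) → PySem.List.max? of the abs-mapped list (rows nonempty in that branch, getD 0 unreachable)
def summarize_residuals_py (values : List Int) : List (String × Int) :=
  let rows : List Int := values.map (fun v => v)
  if rows = [] then [("count", 0), ("max_abs", 0), ("sum_abs", 0)]
  else
    [("count", (rows.length : Int)),
     ("max_abs", (PySem.List.max? (rows.map (fun v => |v|)) (fun x => x)).getD 0),
     ("sum_abs", (rows.map (fun v => |v|)).sum)]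

-- ===== PORT B =====
def summarize_residuals_py_alt (values : List Int) : List (String × Int) :=
  let st := values.foldl
    (fun (st : Int × Int × Int) v =>
      let a := |v|
      (st.1 + 1, if a > st.2.1 then a else st.2.1, st.2.2 + a))
    (0, 0, 0)
  [("count", st.1), ("max_abs", st.2.1), ("sum_abs", st.2.2)]

-- ===== PRECONDITION & SPEC =====
def Spec_summarize_residuals_py (values : List Int) (out : List (String × Int)) : Prop := out = summarize_residuals_py_alt values
instance (values : List Int) (out : List (String × Int)) : Decidable (Spec_summarize_residuals_py values out) := by unfold Spec_summarize_residuals_py; infer_instance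

-- ===== CLAIM (what is proved, stated in full; the proofs are below) =====
def Claim_equal_summarize_residuals_py : Prop := ∀ (values : List Int), Dom_summarize_residuals_py values → Spec_summarize_residuals_py values (summarize_residuals_py values)

-- ===== LEMMAS AND PROOFS =====

-- B's fused loop computes (count, running max of |·|, running sum of |·|).
theorem pv_fold_eq (l : List Int) (c m s : Int) :
    l.foldl (fun (st : Int × Int × Int) v =>
        let a := |v|
        (st.1 + 1, if a > st.2.1 then a else st.2.1, st.2.2 + a)) (c, m, s)
    = (c + l.length, l.foldl (fun m v => max m |v|) m, s + (l.map (fun v => |v|)).sum) := by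
  induction l generalizing c m s with
  | nil => simp
  | cons h t ih =>
    simp only [List.foldl_cons, List.map_cons, List.sum_cons, ih, Prod.mk.injEq]
    refine ⟨by simp [List.length_cons]; ring, ?_, by ring⟩
    congr 1
    split <;> omega

theorem pv_max_run (h : Int) (t : List Int) :
    ((PySem.List.max? ((h :: t).map (fun v => |v|)) (fun x => x)).getD 0)
    = (h :: t).foldl (fun m v => max m |v|) 0 := by
  simp only [List.map_cons, PySem.List.max?_id_cons, Option.getD_some, List.foldl_cons,
    List.foldl_map]
  rw [max_eq_right (abs_nonneg h)]

-- ===== VERDICT =====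
theorem summarize_residuals_py_spec : Claim_equal_summarize_residuals_py := by
  intro values _
  unfold Spec_summarize_residuals_py summarize_residuals_py summarize_residuals_py_alt
  simp only [List.map_id_fun', id_eq, pv_fold_eq]
  cases values with
  | nil => simp
  | cons h t =>
    simp only [if_neg (List.cons_ne_nil h t), pv_max_run]
    norm_num
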